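-- pv_equiv track=rewrite | github.com/ignajaja/coding-II | tarea/tarea_3.py | pares_fibonacci
-- ===== SOURCE A (Python) =====
-- def pares_fibonacci(n):
--     current = 1
--     last = 0
--     result = 0
--     con = 0
--
--     while current < n:
--         if result % 2 == 0 and result > 1:
--             con += 1
--
--         result = last + current
--         last = current
--         current = result
--
--     return con
-- ===== SOURCE B (Python) =====
-- def pares_fibonacci(n):
--     # Count even Fibonacci numbers strictly below n by generating only the
--     # even ones via E_k = 4*E_{k-1} + E_{k-2}, seeded 2, 8.
--     a, b = 2, 8
--     con = 0
--     while a < n: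
--         con += 1
--         a, b = b, 4 * b + a
--     return con
-- ===== Notes on version B (the rewrite author's own statement) =====
-- stated objective: alternative
-- what changed: B generates only the even Fibonacci numbers directly with their own recurrence E_k = 4*E_{k-1} + E_{k-2} and counts them while below n, dropping the full Fibonacci sequence and the parity test (about a third as many iterations, but both run in microseconds so no speedup was measurable).
import Mathlib
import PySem

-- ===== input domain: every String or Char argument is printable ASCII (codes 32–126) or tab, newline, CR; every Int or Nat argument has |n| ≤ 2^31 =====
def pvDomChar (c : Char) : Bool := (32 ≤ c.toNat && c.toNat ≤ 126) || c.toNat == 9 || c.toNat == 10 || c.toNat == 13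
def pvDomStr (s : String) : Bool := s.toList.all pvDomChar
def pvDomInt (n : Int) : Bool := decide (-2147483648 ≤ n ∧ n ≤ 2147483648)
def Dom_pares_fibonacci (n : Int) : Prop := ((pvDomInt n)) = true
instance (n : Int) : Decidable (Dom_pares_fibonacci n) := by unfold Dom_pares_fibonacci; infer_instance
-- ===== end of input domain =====

-- B generates only the even Fibonacci numbers via E_k = 4*E_{k-1} + E_{k-2} (seeds 2, 8),
-- skipping the full sequence and the parity test; proved to return A's exact count for every n.


-- ===== PORT A =====
-- A's while loop; the three Prop arguments are the loop invariant (always true for A's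
-- start state) needed only for termination of the well-founded recursion.
def pvALoop (n current last result con : Int)
    (hc : 1 ≤ current) (hl : 0 ≤ last) (_hlc : last ≤ current) : Int :=
  if h : current < n then
    pvALoop n (last + current) current (last + current)
      (if result % 2 = 0 ∧ result > 1 then con + 1 else con)
      (by omega) (by omega) (by omega)
  else con
termination_by (2 * n - current - last).toNat
decreasing_by omega

def pares_fibonacci (n : Int) : Int :=
  pvALoop n 1 0 0 0 (by norm_num) (by norm_num) (by norm_num)

-- ===== PORT B =====
-- B's while loop over even Fibonacci numbers; the Prop arguments are the invariant
-- (2 ≤ a < b, always true from the seeds) used only for termination.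
def pvBLoop (n a b con : Int) (ha : 2 ≤ a) (hab : a < b) : Int :=
  if h : a < n then
    pvBLoop n b (4 * b + a) (con + 1) (by omega) (by omega)
  else con
termination_by (n - a).toNat
decreasing_by omega

def pares_fibonacci_alt (n : Int) : Int :=
  pvBLoop n 2 8 0 (by norm_num) (by norm_num)

-- ===== PRECONDITION & SPEC =====
def Spec_pares_fibonacci (n : Int) (out : Int) : Prop := out = pares_fibonacci_alt n
instance (n : Int) (out : Int) : Decidable (Spec_pares_fibonacci n out) := by unfold Spec_pares_fibonacci; infer_instance

-- ===== CLAIM (what is proved, stated in full; the proofs are below) =====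
def Claim_equal_pares_fibonacci : Prop := ∀ (n : Int), Dom_pares_fibonacci n → Spec_pares_fibonacci n (pares_fibonacci n)

-- ===== LEMMAS AND PROOFS =====

-- Congruence for pvBLoop in its value arguments (the proof arguments are irrelevant).
theorem pvBLoop_congr (n a a' b b' con : Int) (h2 : 2 ≤ a) (hab : a < b)
    (h2' : 2 ≤ a') (hab' : a' < b') (ha : a = a') (hb : b = b') :
    pvBLoop n a b con h2 hab = pvBLoop n a' b' con h2' hab' := by
  subst ha; subst hb; rfl

-- At a state where `current` is an even Fibonacci number (with odd predecessor `last`),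
-- three iterations of A's loop add exactly one count and reach the next even Fibonacci
-- number 2*last + 3*current, which is one iteration of B's loop.
theorem pvKey (m : Nat) : ∀ (n current last con b : Int)
    (hc : 1 ≤ current) (hl0 : 0 ≤ last) (hlc : last ≤ current),
    (n - current).toNat ≤ m →
    1 ≤ last → last < current → current % 2 = 0 → last % 2 = 1 →
    b = 2 * last + 3 * current →
    ∀ (h2 : 2 ≤ current) (hab : current < b),
      pvALoop n current last current con hc hl0 hlc = pvBLoop n current b con h2 hab := by
  induction m with
  | zero =>
    intro n current last con b hc hl0 hlc hm hl1 hlt hce hlo hb h2 hab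
    have hn : ¬ current < n := by omega
    rw [pvALoop, pvBLoop]
    simp [hn]
  | succ m ih =>
    intro n current last con b hc hl0 hlc hm hl1 hlt hce hlo hb h2 hab
    by_cases hcn : current < n
    · -- step 1: count (current is even and > 1), advance to c1 = last+current (odd)
      rw [pvALoop, dif_pos hcn, if_pos ⟨hce, by omega⟩]
      rw [pvBLoop, dif_pos hcn]
      by_cases h1 : last + current < n
      · -- step 2: c1 odd, no count, advance to c2 = current + c1 (odd)
        rw [pvALoop, dif_pos h1, if_neg (by omega)]
        by_cases hq : current + (last + current) < n
        · -- step 3: c2 odd, no count, advance to c3 = c1 + c2 = 2*last + 3*current = b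
          rw [pvALoop, dif_pos hq, if_neg (by omega)]
          exact (ih n (last + current + (current + (last + current)))
            (current + (last + current)) (con + 1) (4 * b + current)
            (by omega) (by omega) (by omega) (by omega) (by omega) (by omega)
            (by omega) (by omega) (by omega) (by omega) (by omega)).trans
            (pvBLoop_congr _ _ _ _ _ _ _ _ (by omega) (by omega) (by omega) rfl)
        · -- c2 ≥ n: A stops with con+1; B stops too since 4b+current ≥ b ≥ c2 ≥ n
          rw [pvALoop, dif_neg hq, pvBLoop, dif_neg (by omega)]
      · -- c1 ≥ n: A stops with con+1; B stops too since b > c1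
        rw [pvALoop, dif_neg h1, pvBLoop, dif_neg (by omega)]
    · rw [pvALoop, dif_neg hcn, pvBLoop, dif_neg hcn]

-- ===== VERDICT (by name: the statement is the Claim_ definition above) =====
theorem pares_fibonacci_spec : Claim_equal_pares_fibonacci := by
  intro n _
  unfold Spec_pares_fibonacci pares_fibonacci pares_fibonacci_alt
  by_cases h1 : (1 : Int) < n
  · rw [pvALoop, dif_pos h1, if_neg (by omega)]
    rw [pvALoop, dif_pos (show (0 : Int) + 1 < n by omega), if_neg (by omega)]
    exact (pvKey (n - 2).toNat n (1 + (0 + 1)) (0 + 1) 0 8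
      (by omega) (by omega) (by omega) (by omega) (by omega) (by omega)
      (by omega) (by omega) (by omega) (by omega) (by omega)).trans
      (pvBLoop_congr _ _ _ _ _ _ _ _ _ _ (by norm_num) rfl)
  · rw [pvALoop, dif_neg h1, pvBLoop, dif_neg (by omega)]
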